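-- pv_equiv track=rewrite | github.com/lukepark327/CURb | experiments/vit/vit_dl.py | _resolve_orders_for_rounds
-- ===== SOURCE A (Python) =====
-- def _resolve_orders_for_rounds(total_round: int, base_orders: list[list[str]]) -> list[list[str]]:
--     if int(total_round) < 1:
--         raise ValueError("--total_round must be >= 1")
--     if len(base_orders) == 0:
--         raise ValueError("base_orders must be non-empty")
--     out: list[list[str]] = []
--     for r in range(int(total_round)):
--         out.append(list(base_orders[r % len(base_orders)]))
--     return out
-- ===== SOURCE B (Python) =====
-- def _resolve_orders_for_rounds(total_round: int, base_orders: list[list[str]]) -> list[list[str]]: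
--     if int(total_round) < 1:
--         raise ValueError("--total_round must be >= 1")
--     if len(base_orders) == 0:
--         raise ValueError("base_orders must be non-empty")
--     q, r = divmod(int(total_round), len(base_orders))
--     seq = base_orders * q + base_orders[:r]
--     return [list(x) for x in seq]
-- ===== Notes on version B (the rewrite author's own statement) =====
-- stated objective: alternative
-- what changed: Replaces the per-round modulo-indexing loop by quotient-remainder construction: divmod gives q whole copies of base_orders plus a prefix of length r, assembled by list repetition and slicing, then one copy-mapping pass.
import Mathlib
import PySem

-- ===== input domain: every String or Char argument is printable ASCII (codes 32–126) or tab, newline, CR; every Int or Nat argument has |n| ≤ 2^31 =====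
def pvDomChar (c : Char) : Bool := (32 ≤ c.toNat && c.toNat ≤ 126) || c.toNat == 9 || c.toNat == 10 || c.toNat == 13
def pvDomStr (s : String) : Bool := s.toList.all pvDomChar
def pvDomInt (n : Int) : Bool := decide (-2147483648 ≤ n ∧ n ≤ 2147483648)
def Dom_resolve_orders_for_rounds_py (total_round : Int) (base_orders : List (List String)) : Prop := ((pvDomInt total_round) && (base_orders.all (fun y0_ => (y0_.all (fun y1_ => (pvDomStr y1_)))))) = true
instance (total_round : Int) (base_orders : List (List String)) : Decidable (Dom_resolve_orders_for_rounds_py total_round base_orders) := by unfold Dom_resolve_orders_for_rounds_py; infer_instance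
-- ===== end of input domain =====

-- B rebuilds the cycled schedule by quotient-remainder (q whole copies + a prefix of length r) instead of a per-round modulo loop; alternative decomposition, same cost.


-- ===== PORT A =====
-- loop: for r in range(total_round): out.append(list(base_orders[r % len(base_orders)]))
def resolve_orders_for_rounds_py (total_round : Int) (base_orders : List (List String)) : List (List String) :=
  if total_round < 1 then []            -- ValueError, excluded by Pre_
  else if base_orders.length = 0 then []  -- ValueError, excluded by Pre_
  else (PySem.List.pyRange 0 total_round 1).foldl
    (fun out r => out ++ [PySem.List.pyGetD base_orders (PySem.Int.mod r (base_orders.length : Int)) []]) []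

-- ===== PORT B =====
-- q, r = divmod(total_round, len(base_orders)); seq = base_orders * q + base_orders[:r]; [list(x) for x in seq]
def resolve_orders_for_rounds_py_alt (total_round : Int) (base_orders : List (List String)) : List (List String) :=
  if total_round < 1 then []            -- ValueError, excluded by Pre_
  else if base_orders.length = 0 then []  -- ValueError, excluded by Pre_
  else
    let q := PySem.Int.floordiv total_round (base_orders.length : Int)
    let r := PySem.Int.mod total_round (base_orders.length : Int)
    let seq := (List.replicate q.toNat base_orders).flatten ++ PySem.List.slice base_orders none (some r)
    seq.map (fun x => x)

-- ===== PRECONDITION & SPEC =====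
-- A raises ValueError when total_round < 1 or base_orders is empty; exactly those inputs are excluded.
def Pre_resolve_orders_for_rounds_py (total_round : Int) (base_orders : List (List String)) : Prop :=
  1 ≤ total_round ∧ base_orders ≠ []
instance (total_round : Int) (base_orders : List (List String)) : Decidable (Pre_resolve_orders_for_rounds_py total_round base_orders) := by unfold Pre_resolve_orders_for_rounds_py; infer_instance
def pvWitness_resolve_orders_for_rounds_py : Int × List (List String) := (5, [["a", "b"], ["c"]])

def Spec_resolve_orders_for_rounds_py (total_round : Int) (base_orders : List (List String)) (out : List (List String)) : Prop := out = resolve_orders_for_rounds_py_alt total_round base_orders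
instance (total_round : Int) (base_orders : List (List String)) (out : List (List String)) : Decidable (Spec_resolve_orders_for_rounds_py total_round base_orders out) := by unfold Spec_resolve_orders_for_rounds_py; infer_instance

-- ===== CLAIM (what is proved, stated in full; the proofs are below) =====
def Claim_equal_resolve_orders_for_rounds_py : Prop := ∀ (total_round : Int) (base_orders : List (List String)), Dom_resolve_orders_for_rounds_py total_round base_orders → Pre_resolve_orders_for_rounds_py total_round base_orders → Spec_resolve_orders_for_rounds_py total_round base_orders (resolve_orders_for_rounds_py total_round base_orders)

-- ===== LEMMAS AND PROOFS =====

-- the cycle invariant: the first m elements of the infinite cycle of bo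
-- equal (m / n) whole copies of bo followed by its (m % n)-prefix.
lemma cycle_eq_repeat_take (bo : List (List String)) (hbo : bo ≠ []) (m : ℕ) :
    (List.range m).map (fun k => bo.getD (k % bo.length) []) =
      (List.replicate (m / bo.length) bo).flatten ++ bo.take (m % bo.length) := by
  set n := bo.length with hn
  have hn0 : 0 < n := List.length_pos_iff.mpr hbo
  induction m with
  | zero => simp [Nat.zero_div]
  | succ m ih =>
    rw [List.range_succ, List.map_append, ih, List.map_singleton]
    have hmod : m % n < n := Nat.mod_lt _ hn0
    have htake : bo.take (m % n) ++ [bo.getD (m % n) []] = bo.take (m % n + 1) := by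
      rw [List.take_add_one]
      congr 1
      simp [List.getD_eq_getElem?_getD, List.getElem?_eq_getElem hmod]
    rcases Nat.lt_or_ge (m % n + 1) n with hlt | hge
    · have h1 : (m + 1) % n = m % n + 1 := by
        conv_lhs => rw [← Nat.div_add_mod m n, Nat.add_assoc, Nat.mul_add_mod]
        exact Nat.mod_eq_of_lt hlt
      have h2 : (m + 1) / n = m / n := by
        conv_lhs => rw [← Nat.div_add_mod m n, Nat.add_assoc, Nat.mul_add_div hn0]
        rw [Nat.div_eq_of_lt hlt, Nat.add_zero]
      rw [h1, h2, List.append_assoc, htake]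
    · have heq : m % n + 1 = n := by omega
      have h1 : (m + 1) % n = 0 := by
        conv_lhs => rw [← Nat.div_add_mod m n, Nat.add_assoc, heq, Nat.mul_add_mod]
        exact Nat.mod_self n
      have h2 : (m + 1) / n = m / n + 1 := by
        conv_lhs => rw [← Nat.div_add_mod m n, Nat.add_assoc, heq, Nat.mul_add_div hn0]
        rw [Nat.div_self hn0]
      rw [h1, h2, List.append_assoc, htake, heq, List.take_length,
        List.replicate_succ', List.flatten_append]
      simp

-- ===== VERDICT (by name: the statement is the Claim_ definition above) =====
theorem resolve_orders_for_rounds_py_spec : Claim_equal_resolve_orders_for_rounds_py := by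
  intro t bo _hdom hpre
  obtain ⟨ht, hbo⟩ := hpre
  unfold Spec_resolve_orders_for_rounds_py resolve_orders_for_rounds_py resolve_orders_for_rounds_py_alt
  have hn0 : 0 < bo.length := List.length_pos_iff.mpr hbo
  have hm : t = ((t.toNat : ℕ) : Int) := by omega
  rw [if_neg (by omega), if_neg (by omega), if_neg (by omega), if_neg (by omega), hm]
  rw [PySem.List.foldl_append_singleton_eq_map, PySem.List.pyRange_one]
  have hsub : ((((t.toNat : ℕ) : Int)) - 0).toNat = t.toNat := by omega
  rw [hsub, List.map_map]
  have hmap : ∀ k ∈ List.range t.toNat,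
      ((fun r => PySem.List.pyGetD bo (PySem.Int.mod r (bo.length : Int)) []) ∘ fun k : ℕ => (0 : Int) + ↑k) k
        = bo.getD (k % bo.length) [] := by
    intro k _
    simp only [Function.comp, zero_add]
    rw [PySem.Int.mod_natCast, PySem.List.pyGetD_natCast]
  rw [List.map_congr_left hmap, cycle_eq_repeat_take bo hbo t.toNat]
  rw [PySem.Int.floordiv_natCast, PySem.Int.mod_natCast]
  simp only [List.nil_append, Int.toNat_natCast, PySem.List.slice_to_natCast, List.map_id']
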